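-- pv_equiv track=rewrite | github.com/waffle87/leetcode | cycle_queries_tree.py | cycleLengthQueries
-- ===== SOURCE A (Python) =====
-- def cycleLengthQueries(n, queries):
--     """
--     :type n: int
--     :type queries: List[List[int]]
--     :rtype: List[int]
--     """
--     ans = []
--     for a, b in queries:
--         ans.append(1)
--         while a != b:
--             a, b = min(a, b), max(a, b) // 2
--             ans[-1] += 1
--     return ans
-- ===== SOURCE B (Python) =====
-- def cycleLengthQueries(n, queries):
--     res = []
--     for a, b in queries:
--         if a == b:
--             res.append(1)
--         else:
--             da, db = a.bit_length(), b.bit_length()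
--             if da >= db:
--                 hi, lo, d = a, b, da - db
--             else:
--                 hi, lo, d = b, a, db - da
--             res.append(d + 2 * ((hi >> d) ^ lo).bit_length() + 1)
--     return res
-- ===== Notes on version B (the rewrite author's own statement) =====
-- stated objective: alternative
-- what changed: Replaces the interleaved 'halve the larger' loop by a closed bit-arithmetic formula per query: align the deeper node by shifting, then the answer is depth-difference + 2*bit_length(aligned xor) + 1.
import Mathlib
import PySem

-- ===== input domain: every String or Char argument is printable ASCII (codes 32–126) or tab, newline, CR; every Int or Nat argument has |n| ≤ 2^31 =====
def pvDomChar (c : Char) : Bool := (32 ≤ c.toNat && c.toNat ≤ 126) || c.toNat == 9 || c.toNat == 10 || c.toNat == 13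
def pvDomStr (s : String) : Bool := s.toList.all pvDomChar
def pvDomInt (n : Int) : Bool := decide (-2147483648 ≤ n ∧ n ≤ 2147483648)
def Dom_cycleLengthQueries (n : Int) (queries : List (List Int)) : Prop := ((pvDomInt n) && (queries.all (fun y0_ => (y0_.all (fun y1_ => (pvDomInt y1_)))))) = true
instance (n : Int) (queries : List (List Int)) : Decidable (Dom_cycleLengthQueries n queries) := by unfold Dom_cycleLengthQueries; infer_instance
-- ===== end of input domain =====

-- B replaces A's interleaved "halve the larger" loop by a per-query closed bit formula
-- (align depths by shifting, then depth-difference + 2*bitLength(aligned xor) + 1); alternative algorithm, similar cost.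


-- ===== PORT A =====
-- A's while loop, with a fuel bound that only makes it total (never reached under Pre_);
-- fuel 0 is unreachable on admitted inputs.
def loopA : Nat → Int → Int → Int → Int
  | 0, _, _, cnt => cnt
  | fuel + 1, a, b, cnt =>
    if a = b then cnt
    else loopA fuel (min a b) (PySem.Int.floordiv (max a b) 2) (cnt + 1)

-- 'a, b = q' ported as guarded head access (q of length ≠ 2 raises in Python; outside Pre_)
def stepA (ans : List Int) (q : List Int) : List Int :=
  if q.length = 2 then
    ans ++ [loopA (q.headI.natAbs + q.tail.headI.natAbs + 1) q.headI q.tail.headI 1]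
  else ans

def cycleLengthQueries (n : Int) (queries : List (List Int)) : List Int :=
  queries.foldl stepA []

-- ===== PORT B =====
def altOne (a b : Int) : Int :=
  if a = b then 1
  else
    let da := PySem.Int.bitLength a
    let db := PySem.Int.bitLength b
    if da ≥ db then
      ((da - db : Nat) : Int) + 2 * (PySem.Int.bitLength (PySem.Int.bxor (a >>> (da - db)) b) : Int) + 1
    else
      ((db - da : Nat) : Int) + 2 * (PySem.Int.bitLength (PySem.Int.bxor (b >>> (db - da)) a) : Int) + 1

-- 'a, b = q' ported as guarded head access (q of length ≠ 2 raises in Python; outside Pre_)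
def oneB (q : List Int) : Int :=
  if q.length = 2 then altOne q.headI q.tail.headI else 0

def cycleLengthQueries_alt (n : Int) (queries : List (List Int)) : List Int :=
  queries.map oneB

-- ===== PRECONDITION & SPEC =====
-- Pre_ excludes queries not of length exactly 2 (A raises ValueError unpacking) and queries with a
-- negative element unequal to the other (A's while loop never terminates there); on every other input A returns.
def qOk (q : List Int) : Bool :=
  decide (q.length = 2) && ((decide (0 ≤ q.headI) && decide (0 ≤ q.tail.headI)) || q.headI == q.tail.headI)

def Pre_cycleLengthQueries (n : Int) (queries : List (List Int)) : Prop :=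
  queries.all qOk = true
instance (n : Int) (queries : List (List Int)) : Decidable (Pre_cycleLengthQueries n queries) := by
  unfold Pre_cycleLengthQueries; infer_instance

def pvWitness_cycleLengthQueries : Int × List (List Int) := (3, [[5, 3], [4, 7], [2, 2], [0, 6]])

def Spec_cycleLengthQueries (n : Int) (queries : List (List Int)) (out : List Int) : Prop := out = cycleLengthQueries_alt n queries
instance (n : Int) (queries : List (List Int)) (out : List Int) : Decidable (Spec_cycleLengthQueries n queries out) := by unfold Spec_cycleLengthQueries; infer_instance

-- ===== CLAIM (what is proved, stated in full; the proofs are below) =====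
def Claim_equal_cycleLengthQueries : Prop := ∀ (n : Int) (queries : List (List Int)), Dom_cycleLengthQueries n queries → Pre_cycleLengthQueries n queries → Spec_cycleLengthQueries n queries (cycleLengthQueries n queries)

-- ===== LEMMAS AND PROOFS =====

-- Nat-level bit length (B's bit_length on nonnegative values, seen from Nat)
def L (m : Nat) : Nat := PySem.Int.bitLength (m : Int)

lemma L_zero : L 0 = 0 := by simp [L]

lemma L_half (m : Nat) (h : 0 < m) : L m = L (m / 2) + 1 :=
  PySem.Int.bitLength_natCast h

lemma L_pos (m : Nat) (h : 0 < m) : 1 ≤ L m := by rw [L_half m h]; omega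

lemma L_mono {a b : Nat} (h : a ≤ b) : L a ≤ L b := by
  by_contra hc
  replace hc : L b < L a := Nat.lt_of_not_le hc
  rcases Nat.eq_zero_or_pos a with ha | ha
  · simp [ha, L_zero] at hc
  have h1 : b < 2 ^ L b := by
    have := PySem.Int.lt_two_pow_bitLength (b : Int)
    simpa [L] using this
  have h2 : 2 ^ (L a - 1) ≤ a := by
    have := PySem.Int.two_pow_bitLength_le (a : Int) (by exact_mod_cast ha.ne')
    simpa [L] using this
  have h3 : 2 ^ L b ≤ 2 ^ (L a - 1) := Nat.pow_le_pow_right (by omega) (by omega)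
  omega

-- B's formula at the Nat level: steps from (a,b) to their meeting point
def F (a b : Nat) : Nat :=
  if L a ≥ L b then (L a - L b) + 2 * L ((a >>> (L a - L b)) ^^^ b)
  else (L b - L a) + 2 * L ((b >>> (L b - L a)) ^^^ a)

lemma F_self (a : Nat) : F a a = 0 := by simp [F, L_zero]

lemma F_symm (a b : Nat) : F a b = F b a := by
  unfold F
  rcases lt_trichotomy (L a) (L b) with h | h | h
  · rw [if_neg (by omega), if_pos (by omega)]
  · simp [h, Nat.xor_comm]
  · rw [if_pos (by omega), if_neg (by omega)]

lemma F_step (a b : Nat) (h : a < b) : F a b = F a (b / 2) + 1 := by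
  have hb : 0 < b := by omega
  have hmono : L a ≤ L b := L_mono (le_of_lt h)
  have hhalf : L b = L (b / 2) + 1 := L_half b hb
  rcases eq_or_lt_of_le hmono with heq | hlt
  · -- equal depths
    have hLb1 : 1 ≤ L b := L_pos b hb
    have hx : a ^^^ b ≠ 0 := by
      simpa [Nat.xor_eq_zero_iff] using (Nat.ne_of_lt h)
    have hxL : L (a ^^^ b) = L ((a ^^^ b) / 2) + 1 := L_half _ (Nat.pos_of_ne_zero hx)
    unfold F
    rw [if_pos (by omega), if_pos (by omega)]
    have hd : L a - L (b / 2) = 1 := by omega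
    rw [hd, ← heq, Nat.sub_self]
    have hdist : (a ^^^ b) >>> 1 = (a >>> 1) ^^^ (b >>> 1) := Nat.shiftRight_xor_distrib
    have hb2 : b / 2 = b >>> 1 := (Nat.shiftRight_one b).symm
    have ha2 : a >>> 1 = a / 2 := Nat.shiftRight_one a
    rw [hb2, ← hdist]
    simp only [Nat.shiftRight_zero, Nat.shiftRight_one]
    omega
  · -- L a < L b
    rcases eq_or_lt_of_le (by omega : L a ≤ L (b / 2)) with heq2 | hlt2
    · -- L a = L (b/2): after halving, depths equal
      unfold F
      rw [if_neg (by omega), if_pos (by omega)]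
      rw [← heq2, Nat.sub_self]
      have hd : L b - L a = 1 := by omega
      rw [hd]
      have : b / 2 = b >>> 1 := (Nat.shiftRight_one b).symm
      rw [this, Nat.xor_comm]
      simp only [Nat.shiftRight_zero]
      omega
    · -- L a < L (b/2)
      unfold F
      rw [if_neg (by omega), if_neg (by omega)]
      have hsh : (b / 2) >>> (L (b / 2) - L a) = b >>> (L b - L a) := by
        have : L b - L a = 1 + (L (b / 2) - L a) := by omega
        rw [this, Nat.shiftRight_add, Nat.shiftRight_one]
      rw [hsh]
      omega

lemma F_rec (a b : Nat) (h : a ≠ b) :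
    F a b = F (min a b) (max a b / 2) + 1 := by
  rcases lt_or_gt_of_ne h with hlt | hgt
  · rw [min_eq_left hlt.le, max_eq_right hlt.le]; exact F_step a b hlt
  · rw [min_eq_right hgt.le, max_eq_left hgt.le, F_symm]; exact F_step b a hgt

lemma floordiv_cast_two (m : Nat) :
    PySem.Int.floordiv (m : Int) 2 = ((m / 2 : Nat) : Int) := by
  exact_mod_cast PySem.Int.floordiv_natCast m 2

lemma loopA_eq (fuel : Nat) : ∀ (a b : Nat) (c : Int), a + b < fuel →
    loopA fuel (a : Int) (b : Int) c = c + (F a b : Int) := by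
  induction fuel with
  | zero => intro a b c h; omega
  | succ fuel ih =>
    intro a b c h
    by_cases hab : a = b
    · subst hab
      simp [loopA, F_self]
    · have hcast : ((a : Int) = (b : Int)) ↔ a = b := by exact_mod_cast Iff.rfl
      rw [loopA, if_neg (by simpa [hcast] using hab)]
      have hmin : min (a : Int) (b : Int) = ((min a b : Nat) : Int) := by
        exact_mod_cast (Nat.cast_min (m := a) (n := b)).symm
      have hmax : max (a : Int) (b : Int) = ((max a b : Nat) : Int) := by
        exact_mod_cast (Nat.cast_max (m := a) (n := b)).symm
      rw [hmin, hmax, floordiv_cast_two]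
      have hm : 0 < max a b := by omega
      have hlt : min a b + max a b / 2 < fuel := by
        have : min a b + max a b = a + b := by omega
        omega
      rw [ih _ _ _ hlt, F_rec a b hab]
      push_cast
      ring

-- bridging B's Int-level formula to F
lemma altOne_eq (a b : Nat) : altOne (a : Int) (b : Int) = 1 + (F a b : Int) := by
  by_cases hab : a = b
  · subst hab; simp [altOne, F_self]
  · have hne : (a : Int) ≠ (b : Int) := by exact_mod_cast hab
    have hLa : PySem.Int.bitLength (a : Int) = L a := rfl
    have hLb : PySem.Int.bitLength (b : Int) = L b := rfl
    have hshA : ∀ d : Nat, ((a : Int) >>> d) = ((a >>> d : Nat) : Int) := by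
      intro d; simp [Int.shiftRight_eq_div_pow, Nat.shiftRight_eq_div_pow]
    have hshB : ∀ d : Nat, ((b : Int) >>> d) = ((b >>> d : Nat) : Int) := by
      intro d; simp [Int.shiftRight_eq_div_pow, Nat.shiftRight_eq_div_pow]
    by_cases hd : L a ≥ L b
    · simp only [altOne, F, if_neg hne, hLa, hLb, if_pos hd, hshA, PySem.Int.bxor_natCast]
      push_cast
      simp only [L]
      ring
    · simp only [altOne, F, if_neg hne, hLa, hLb, if_neg hd, hshB, PySem.Int.bxor_natCast]
      push_cast
      simp only [L]
      ring

lemma loopA_self (fuel : Nat) (a c : Int) (h : 1 ≤ fuel) : loopA fuel a a c = c := by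
  cases fuel with
  | zero => omega
  | succ n => simp [loopA]

lemma per_query (a b : Int) (hq : (0 ≤ a ∧ 0 ≤ b) ∨ a = b) :
    loopA (a.natAbs + b.natAbs + 1) a b 1 = altOne a b := by
  rcases hq with ⟨ha, hb⟩ | hab
  · obtain ⟨A, rfl⟩ : ∃ A : Nat, a = (A : Int) := ⟨a.toNat, (Int.toNat_of_nonneg ha).symm⟩
    obtain ⟨B, rfl⟩ : ∃ B : Nat, b = (B : Int) := ⟨b.toNat, (Int.toNat_of_nonneg hb).symm⟩
    rw [loopA_eq _ A B 1 (by simp), altOne_eq]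
  · subst hab
    rw [loopA_self _ _ _ (by omega)]
    simp [altOne]

lemma fold_eq (queries : List (List Int)) (hp : queries.all qOk = true) (acc : List Int) :
    queries.foldl stepA acc = acc ++ queries.map oneB := by
  induction queries generalizing acc with
  | nil => simp
  | cons q qs ih =>
    rw [List.all_cons, Bool.and_eq_true] at hp
    simp only [List.foldl_cons, List.map_cons]
    by_cases hl : q.length = 2
    · have hq := hp.1
      simp only [qOk, hl, decide_true, Bool.true_and, Bool.or_eq_true, Bool.and_eq_true,
        decide_eq_true_eq, beq_iff_eq] at hq
      have hstep : stepA acc q = acc ++ [oneB q] := by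
        simp [stepA, oneB, hl, per_query q.headI q.tail.headI hq]
      rw [hstep, ih hp.2]
      simp
    · exfalso
      have := hp.1
      simp [qOk, hl] at this

-- ===== VERDICT (by name: the statement is the Claim_ definition above) =====
theorem cycleLengthQueries_spec : Claim_equal_cycleLengthQueries := by
  intro n queries _ hpre
  unfold Spec_cycleLengthQueries cycleLengthQueries cycleLengthQueries_alt
  rw [fold_eq queries hpre []]
  simp
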